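-- pv_equiv track=rewrite | github.com/UMDhodi/AI-for-Retail-commerce-market-Intelligence | interactive_qa.py | _extract_intent_from_question
-- ===== SOURCE A (Python) =====
-- def _extract_intent_from_question(question: str) -> str:
--     """Extract the business intent from the question"""
--     question_lower = question.lower()
--
--     # Check if specific item is mentioned with "tell me about" - this should be item analysis
--     if any(phrase in question_lower for phrase in ['tell me about']) and not any(phrase in question_lower for phrase in ['my stock', 'stock details', 'inventory']):
--         return 'specific_item_analysis'
--
--     # Stock overview queries
--     elif any(phrase in question_lower for phrase in ['tell me about', 'show me', 'what is my', 'my stock', 'stock details', 'inventory']):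
--         return 'stock_overview'
--     elif any(phrase in question_lower for phrase in ['what should i do', 'what to do', 'today for my shop', 'general advice']):
--         return 'general_analysis'
--
--     # Top/bottom selling analysis
--     elif any(phrase in question_lower for phrase in ['top selling', 'best selling', 'top 3', 'top three', 'which product top', 'highest selling']):
--         return 'top_selling_analysis'
--     elif any(phrase in question_lower for phrase in ['slow selling', 'slowly', 'less sold', 'worst selling', 'bottom', 'not selling', 'selling slowly']):
--         return 'slow_selling_analysis'
--     elif any(phrase in question_lower for phrase in ['should i focus', 'focus on top', 'concentrate on']):
--         return 'focus_analysis'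
--
--     # Cash flow and reduction
--     elif any(phrase in question_lower for phrase in ['save cash', 'reduce to save', 'free up cash', 'what should i reduce']):
--         return 'cash_saving_analysis'
--     elif any(word in question_lower for word in ['reduce', 'decrease', 'less', 'cut down', 'stop buying']):
--         return 'reduce'
--
--     # Restocking
--     elif any(word in question_lower for word in ['restock', 'stock more', 'increase', 'buy more', 'order more']):
--         return 'restock'
--
--     # Seasonal and contextual
--     elif any(word in question_lower for word in ['festival', 'diwali', 'holi', 'eid', 'navratri', 'durga puja']):
--         return 'festival_prep'
--     elif any(word in question_lower for word in ['rain', 'monsoon', 'weather', 'hot', 'cold', 'summer', 'winter']):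
--         return 'weather_impact'
--     elif any(word in question_lower for word in ['price', 'pricing', 'cost', 'expensive', 'cheap']):
--         return 'pricing'
--     elif any(word in question_lower for word in ['competition', 'competitor', 'nearby shop', 'other shop']):
--         return 'competition'
--     elif any(word in question_lower for word in ['demand', 'customer', 'selling', 'popular']):
--         return 'demand_analysis'
--
--     # Forecast and prediction
--     elif any(word in question_lower for word in ['forecast', 'predict', 'future', 'next week', 'tomorrow']):
--         return 'forecast_analysis'
--
--     else:
--         return 'daily_operations'
-- ===== SOURCE B (Python) =====
-- # Flat phrase->(priority,label) map; the answer is the label of the minimum-priority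
-- # phrase that occurs in the question.  Rule 1's exclusion clause is encoded by giving
-- # the exclude phrases (which are also rule 2 triggers) smaller priorities than
-- # 'tell me about'.
-- _PHRASE_PRIORITY = {
--     'my stock': (0, 'stock_overview'),
--     'stock details': (1, 'stock_overview'),
--     'inventory': (2, 'stock_overview'),
--     'tell me about': (3, 'specific_item_analysis'),
--     'show me': (4, 'stock_overview'),
--     'what is my': (5, 'stock_overview'),
--     'what should i do': (6, 'general_analysis'),
--     'what to do': (7, 'general_analysis'),
--     'today for my shop': (8, 'general_analysis'),
--     'general advice': (9, 'general_analysis'),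
--     'top selling': (10, 'top_selling_analysis'),
--     'best selling': (11, 'top_selling_analysis'),
--     'top 3': (12, 'top_selling_analysis'),
--     'top three': (13, 'top_selling_analysis'),
--     'which product top': (14, 'top_selling_analysis'),
--     'highest selling': (15, 'top_selling_analysis'),
--     'slow selling': (16, 'slow_selling_analysis'),
--     'slowly': (17, 'slow_selling_analysis'),
--     'less sold': (18, 'slow_selling_analysis'),
--     'worst selling': (19, 'slow_selling_analysis'),
--     'bottom': (20, 'slow_selling_analysis'),
--     'not selling': (21, 'slow_selling_analysis'),
--     'selling slowly': (22, 'slow_selling_analysis'),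
--     'should i focus': (23, 'focus_analysis'),
--     'focus on top': (24, 'focus_analysis'),
--     'concentrate on': (25, 'focus_analysis'),
--     'save cash': (26, 'cash_saving_analysis'),
--     'reduce to save': (27, 'cash_saving_analysis'),
--     'free up cash': (28, 'cash_saving_analysis'),
--     'what should i reduce': (29, 'cash_saving_analysis'),
--     'reduce': (30, 'reduce'),
--     'decrease': (31, 'reduce'),
--     'less': (32, 'reduce'),
--     'cut down': (33, 'reduce'),
--     'stop buying': (34, 'reduce'),
--     'restock': (35, 'restock'),
--     'stock more': (36, 'restock'),
--     'increase': (37, 'restock'),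
--     'buy more': (38, 'restock'),
--     'order more': (39, 'restock'),
--     'festival': (40, 'festival_prep'),
--     'diwali': (41, 'festival_prep'),
--     'holi': (42, 'festival_prep'),
--     'eid': (43, 'festival_prep'),
--     'navratri': (44, 'festival_prep'),
--     'durga puja': (45, 'festival_prep'),
--     'rain': (46, 'weather_impact'),
--     'monsoon': (47, 'weather_impact'),
--     'weather': (48, 'weather_impact'),
--     'hot': (49, 'weather_impact'),
--     'cold': (50, 'weather_impact'),
--     'summer': (51, 'weather_impact'),
--     'winter': (52, 'weather_impact'),
--     'price': (53, 'pricing'),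
--     'pricing': (54, 'pricing'),
--     'cost': (55, 'pricing'),
--     'expensive': (56, 'pricing'),
--     'cheap': (57, 'pricing'),
--     'competition': (58, 'competition'),
--     'competitor': (59, 'competition'),
--     'nearby shop': (60, 'competition'),
--     'other shop': (61, 'competition'),
--     'demand': (62, 'demand_analysis'),
--     'customer': (63, 'demand_analysis'),
--     'selling': (64, 'demand_analysis'),
--     'popular': (65, 'demand_analysis'),
--     'forecast': (66, 'forecast_analysis'),
--     'predict': (67, 'forecast_analysis'),
--     'future': (68, 'forecast_analysis'),
--     'next week': (69, 'forecast_analysis'),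
--     'tomorrow': (70, 'forecast_analysis'),
-- }
--
-- def _extract_intent_from_question(question: str) -> str:
--     question_lower = question.lower()
--     hits = [pl for phrase, pl in _PHRASE_PRIORITY.items() if phrase in question_lower]
--     if not hits:
--         return 'daily_operations'
--     return min(hits, key=lambda pl: pl[0])[1]
-- ===== Notes on version B (the rewrite author's own statement) =====
-- stated objective: alternative
-- what changed: The ordered 16-branch if/elif rule scan (with an explicit exclusion clause) is replaced by a flat phrase-to-(priority,label) map: B collects every phrase that occurs in the lowered question and returns the label of the minimum-priority hit, the exclusion being encoded by giving the exclude phrases smaller priorities than rule 1's trigger phrase.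
import Mathlib
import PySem

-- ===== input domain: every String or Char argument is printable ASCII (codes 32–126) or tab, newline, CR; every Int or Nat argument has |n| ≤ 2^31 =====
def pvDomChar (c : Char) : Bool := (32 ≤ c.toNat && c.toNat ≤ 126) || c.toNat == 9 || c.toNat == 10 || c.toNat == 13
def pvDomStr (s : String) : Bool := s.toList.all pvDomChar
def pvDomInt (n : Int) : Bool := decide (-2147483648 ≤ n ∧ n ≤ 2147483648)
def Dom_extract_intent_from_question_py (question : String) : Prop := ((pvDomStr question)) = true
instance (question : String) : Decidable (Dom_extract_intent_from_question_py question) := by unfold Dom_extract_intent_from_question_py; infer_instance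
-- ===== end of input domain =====

-- B replaces A's ordered if/elif rule scan (with an exclusion clause) by a flat
-- phrase→(priority,label) map: collect all matching phrases, return the label of the
-- minimum-priority hit (alternative formulation); same results.

-- ===== PORT A =====
-- literal transliteration of the if/elif chain; 'phrase in question_lower' = PySem.Str.isIn
def extract_intent_from_question_py (question : String) : String :=
  let ql := PySem.Str.lower question
  if (["tell me about"].any (fun p => PySem.Str.isIn p ql)) &&
     !(["my stock", "stock details", "inventory"].any (fun p => PySem.Str.isIn p ql)) then
    "specific_item_analysis"
  else if ["tell me about", "show me", "what is my", "my stock", "stock details", "inventory"].any (fun p => PySem.Str.isIn p ql) then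
    "stock_overview"
  else if ["what should i do", "what to do", "today for my shop", "general advice"].any (fun p => PySem.Str.isIn p ql) then
    "general_analysis"
  else if ["top selling", "best selling", "top 3", "top three", "which product top", "highest selling"].any (fun p => PySem.Str.isIn p ql) then
    "top_selling_analysis"
  else if ["slow selling", "slowly", "less sold", "worst selling", "bottom", "not selling", "selling slowly"].any (fun p => PySem.Str.isIn p ql) then
    "slow_selling_analysis"
  else if ["should i focus", "focus on top", "concentrate on"].any (fun p => PySem.Str.isIn p ql) then
    "focus_analysis"
  else if ["save cash", "reduce to save", "free up cash", "what should i reduce"].any (fun p => PySem.Str.isIn p ql) then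
    "cash_saving_analysis"
  else if ["reduce", "decrease", "less", "cut down", "stop buying"].any (fun p => PySem.Str.isIn p ql) then
    "reduce"
  else if ["restock", "stock more", "increase", "buy more", "order more"].any (fun p => PySem.Str.isIn p ql) then
    "restock"
  else if ["festival", "diwali", "holi", "eid", "navratri", "durga puja"].any (fun p => PySem.Str.isIn p ql) then
    "festival_prep"
  else if ["rain", "monsoon", "weather", "hot", "cold", "summer", "winter"].any (fun p => PySem.Str.isIn p ql) then
    "weather_impact"
  else if ["price", "pricing", "cost", "expensive", "cheap"].any (fun p => PySem.Str.isIn p ql) then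
    "pricing"
  else if ["competition", "competitor", "nearby shop", "other shop"].any (fun p => PySem.Str.isIn p ql) then
    "competition"
  else if ["demand", "customer", "selling", "popular"].any (fun p => PySem.Str.isIn p ql) then
    "demand_analysis"
  else if ["forecast", "predict", "future", "next week", "tomorrow"].any (fun p => PySem.Str.isIn p ql) then
    "forecast_analysis"
  else
    "daily_operations"

-- ===== PORT B =====
-- Source B's _PHRASE_PRIORITY dict in insertion order: phrase, (priority, label)
def pvPhraseTable : List (String × Nat × String) :=
  [ ("my stock", 0, "stock_overview"),
    ("stock details", 1, "stock_overview"),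
    ("inventory", 2, "stock_overview"),
    ("tell me about", 3, "specific_item_analysis"),
    ("show me", 4, "stock_overview"),
    ("what is my", 5, "stock_overview"),
    ("what should i do", 6, "general_analysis"),
    ("what to do", 7, "general_analysis"),
    ("today for my shop", 8, "general_analysis"),
    ("general advice", 9, "general_analysis"),
    ("top selling", 10, "top_selling_analysis"),
    ("best selling", 11, "top_selling_analysis"),
    ("top 3", 12, "top_selling_analysis"),
    ("top three", 13, "top_selling_analysis"),
    ("which product top", 14, "top_selling_analysis"),
    ("highest selling", 15, "top_selling_analysis"),
    ("slow selling", 16, "slow_selling_analysis"),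
    ("slowly", 17, "slow_selling_analysis"),
    ("less sold", 18, "slow_selling_analysis"),
    ("worst selling", 19, "slow_selling_analysis"),
    ("bottom", 20, "slow_selling_analysis"),
    ("not selling", 21, "slow_selling_analysis"),
    ("selling slowly", 22, "slow_selling_analysis"),
    ("should i focus", 23, "focus_analysis"),
    ("focus on top", 24, "focus_analysis"),
    ("concentrate on", 25, "focus_analysis"),
    ("save cash", 26, "cash_saving_analysis"),
    ("reduce to save", 27, "cash_saving_analysis"),
    ("free up cash", 28, "cash_saving_analysis"),
    ("what should i reduce", 29, "cash_saving_analysis"),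
    ("reduce", 30, "reduce"),
    ("decrease", 31, "reduce"),
    ("less", 32, "reduce"),
    ("cut down", 33, "reduce"),
    ("stop buying", 34, "reduce"),
    ("restock", 35, "restock"),
    ("stock more", 36, "restock"),
    ("increase", 37, "restock"),
    ("buy more", 38, "restock"),
    ("order more", 39, "restock"),
    ("festival", 40, "festival_prep"),
    ("diwali", 41, "festival_prep"),
    ("holi", 42, "festival_prep"),
    ("eid", 43, "festival_prep"),
    ("navratri", 44, "festival_prep"),
    ("durga puja", 45, "festival_prep"),
    ("rain", 46, "weather_impact"),
    ("monsoon", 47, "weather_impact"),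
    ("weather", 48, "weather_impact"),
    ("hot", 49, "weather_impact"),
    ("cold", 50, "weather_impact"),
    ("summer", 51, "weather_impact"),
    ("winter", 52, "weather_impact"),
    ("price", 53, "pricing"),
    ("pricing", 54, "pricing"),
    ("cost", 55, "pricing"),
    ("expensive", 56, "pricing"),
    ("cheap", 57, "pricing"),
    ("competition", 58, "competition"),
    ("competitor", 59, "competition"),
    ("nearby shop", 60, "competition"),
    ("other shop", 61, "competition"),
    ("demand", 62, "demand_analysis"),
    ("customer", 63, "demand_analysis"),
    ("selling", 64, "demand_analysis"),
    ("popular", 65, "demand_analysis"),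
    ("forecast", 66, "forecast_analysis"),
    ("predict", 67, "forecast_analysis"),
    ("future", 68, "forecast_analysis"),
    ("next week", 69, "forecast_analysis"),
    ("tomorrow", 70, "forecast_analysis") ]

-- Source B: hits = all (priority,label) pairs whose phrase occurs; answer = label of min-priority hit
def extract_intent_from_question_py_alt (question : String) : String :=
  let ql := PySem.Str.lower question
  let hits := (pvPhraseTable.filter (fun e => PySem.Str.isIn e.1 ql)).map (fun e => e.2)
  ((PySem.List.min? hits (fun pl => pl.1)).map (fun pl => pl.2)).getD "daily_operations"

-- ===== PRECONDITION & SPEC =====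
def Spec_extract_intent_from_question_py (question : String) (out : String) : Prop := out = extract_intent_from_question_py_alt question
instance (question : String) (out : String) : Decidable (Spec_extract_intent_from_question_py question out) := by unfold Spec_extract_intent_from_question_py; infer_instance

-- ===== CLAIM =====
def Claim_equal_extract_intent_from_question_py : Prop := ∀ (question : String), Dom_extract_intent_from_question_py question → Spec_extract_intent_from_question_py question (extract_intent_from_question_py question)

-- ===== LEMMAS AND PROOFS =====

-- min? of a cons whose head key is strictly below every later key is the head
theorem pv_min?_head (t : List (Nat × String)) : ∀ x : Nat × String,
    (∀ y ∈ t, x.1 < y.1) →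
    PySem.List.min? (x :: t) (fun pl => pl.1) = some x := by
  induction t with
  | nil => intro x _; rfl
  | cons y t ih =>
    intro x h
    have hy : ¬ y.1 < x.1 := by
      have := h y (by simp)
      omega
    have step : PySem.List.min? (x :: y :: t) (fun pl : Nat × String => pl.1)
        = PySem.List.min? (x :: t) (fun pl : Nat × String => pl.1) := by
      simp only [PySem.List.min?, List.foldl_cons, if_neg hy]
    rw [step]
    exact ih x (fun z hz => h z (by simp [hz]))

-- first-match reading of Source B's min-of-hits, as an Option
def pvFirstOpt (ql : String) : List (String × Nat × String) → Option (Nat × String)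
  | [] => none
  | e :: rest => if PySem.Str.isIn e.1 ql then some e.2 else pvFirstOpt ql rest

theorem pv_min?_eq_firstOpt (ql : String) : ∀ (tbl : List (String × Nat × String)),
    ((tbl.map (fun e => e.2)).Pairwise (fun a b : Nat × String => a.1 < b.1)) →
    PySem.List.min? ((tbl.filter (fun e => PySem.Str.isIn e.1 ql)).map (fun e => e.2))
      (fun pl => pl.1) = pvFirstOpt ql tbl := by
  intro tbl
  induction tbl with
  | nil => intro _; rfl
  | cons e rest ih =>
    intro h
    have h0 : (e.2 :: rest.map (fun e => e.2)).Pairwise (fun a b : Nat × String => a.1 < b.1) := by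
      simpa using h
    have h' := List.pairwise_cons.mp h0
    by_cases he : PySem.Str.isIn e.1 ql = true
    · simp only [List.filter_cons, he, if_pos, List.map_cons, pvFirstOpt]
      apply pv_min?_head
      intro y hy
      rcases List.mem_map.mp hy with ⟨z, hz, rfl⟩
      exact h'.1 z.2 (List.mem_map.mpr ⟨z, List.mem_of_mem_filter hz, rfl⟩)
    · simp only [List.filter_cons, he, pvFirstOpt, Bool.false_eq_true, ite_false]
      exact ih (by simpa using h'.2)

-- first-match reading, directly as the label
def pvFirstLab (ql : String) : List (String × Nat × String) → String
  | [] => "daily_operations"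
  | e :: rest => if PySem.Str.isIn e.1 ql then e.2.2 else pvFirstLab ql rest

theorem pv_first_label (ql : String) : ∀ (tbl : List (String × Nat × String)),
    ((pvFirstOpt ql tbl).map (fun pl : Nat × String => pl.2)).getD "daily_operations"
      = pvFirstLab ql tbl := by
  intro tbl
  induction tbl with
  | nil => rfl
  | cons e rest ih =>
    simp only [pvFirstOpt, pvFirstLab]
    by_cases he : PySem.Str.isIn e.1 ql = true
    · rw [if_pos he, if_pos he]
      rfl
    · rw [if_neg he, if_neg he]
      exact ih

-- flatten an if on a disjunction (Prop form)
theorem pv_if_or_prop {α : Type} (a b : Prop) [Decidable a] [Decidable b] (x y : α) :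
    (if a ∨ b then x else y) = (if a then x else if b then x else y) := by
  by_cases ha : a <;> by_cases hb : b <;> simp [ha, hb]

theorem pv_table_pairwise :
    ((pvPhraseTable.map (fun e => e.2)).Pairwise (fun a b : Nat × String => a.1 < b.1)) := by
  unfold pvPhraseTable
  decide

-- ===== VERDICT =====
set_option maxRecDepth 4000 in
set_option maxHeartbeats 2000000 in
theorem extract_intent_from_question_py_spec : Claim_equal_extract_intent_from_question_py := by
  intro question _
  simp only [Spec_extract_intent_from_question_py, extract_intent_from_question_py,
    extract_intent_from_question_py_alt]
  rw [pv_min?_eq_firstOpt _ _ pv_table_pairwise, pv_first_label]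
  set s := PySem.Str.lower question with hs
  by_cases h1 : PySem.Str.isIn "my stock" s = true <;>
  by_cases h2 : PySem.Str.isIn "stock details" s = true <;>
  by_cases h3 : PySem.Str.isIn "inventory" s = true <;>
  by_cases h4 : PySem.Str.isIn "tell me about" s = true <;>
    simp [pvPhraseTable, pvFirstLab, List.any_cons, List.any_nil, h1, h2, h3, h4, pv_if_or_prop,
      -PySem.Str.isIn_eq]
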